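-- pv_equiv track=rewrite | github.com/dcschenc/myleetcode | 1934-evaluate-the-bracket-pairs-of-a-string/1934-evaluate-the-bracket-pairs-of-a-string.py | evaluate
-- ===== SOURCE A (Python) =====
-- from typing import List
--
-- def evaluate(s: str, knowledge: List[List[str]]) -> str:
--     # https://github.com/doocs/leetcode/tree/main/solution/1800-1899/1807.Evaluate%20the%20Bracket%20Pairs%20of%20a%20String
--     d = {a: b for a, b in knowledge}
--     i, n = 0, len(s)
--     ans = []
--     while i < n:
--         if s[i] == '(':
--             j = s.find(')', i + 1)
--             ans.append(d.get(s[i + 1 : j], '?'))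
--             i = j
--         else:
--             ans.append(s[i])
--         i += 1
--     return ''.join(ans)
--
--
--     hm = {}
--     for a, b in knowledge:
--         hm[a] = b
--     i, n = 0, len(s)
--     ans = ''
--     while i < n:
--         if s[i] != '(':
--             ans += s[i]
--             i += 1
--         else:
--             j = i
--             while j + 1 < n and s[j + 1] != ')':
--                 j += 1
--             k = s[i+1:j+1]
--             if k in hm:
--                 ans += hm[k]
--             else:
--                 ans += '?'
--             i = j + 2
--     return ans
-- ===== SOURCE B (Python) =====
-- from typing import List
--
-- def evaluate(s: str, knowledge: List[List[str]]) -> str: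
--     # Chunk-based rewrite: repeatedly split off the text before the next '(' and
--     # the key up to the matching ')' with str.partition, instead of scanning
--     # character by character with an index.
--     d = dict(knowledge)
--     parts = []
--     rest = s
--     while True:
--         before, bra, after = rest.partition('(')
--         parts.append(before)
--         if not bra:
--             break
--         key, _ket, rest = after.partition(')')
--         parts.append(d.get(key, '?'))
--     return ''.join(parts)
-- ===== Notes on version B (the rewrite author's own statement) =====
-- stated objective: idiomatic
-- what changed: Replaces the character-by-character index loop with s.find(')') inside by a chunk-based loop that repeatedly splits off the text before the next '(' and the key up to the next ')' with str.partition.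
import Mathlib
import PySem

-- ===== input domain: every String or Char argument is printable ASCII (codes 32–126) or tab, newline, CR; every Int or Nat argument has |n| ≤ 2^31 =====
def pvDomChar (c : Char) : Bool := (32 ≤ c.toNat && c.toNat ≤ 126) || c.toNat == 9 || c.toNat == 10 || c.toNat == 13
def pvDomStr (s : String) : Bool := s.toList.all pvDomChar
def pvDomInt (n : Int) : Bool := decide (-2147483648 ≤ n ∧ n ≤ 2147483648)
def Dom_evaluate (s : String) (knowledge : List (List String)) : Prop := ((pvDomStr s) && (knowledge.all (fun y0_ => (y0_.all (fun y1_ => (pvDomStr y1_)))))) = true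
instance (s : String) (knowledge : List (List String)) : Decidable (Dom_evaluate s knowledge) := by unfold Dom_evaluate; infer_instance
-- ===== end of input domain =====

-- B replaces A's character-by-character index scan by repeated str.partition chunking; equal return values on Pre_ (well-formed input).

-- ===== PORT A =====
-- d = {a: b for a, b in knowledge}; a row not of length 2 raises ValueError in Python (excluded by Pre_evaluate), the port skips it
def evalBuildA (knowledge : List (List String)) : PySem.Dict String String :=
  knowledge.foldl (fun d kv =>
    match kv with
    | [a, b] => d.insert a b
    | _ => d) PySem.Dict.empty

-- the while-loop of A; fuel is only a totalization guard (one unit per iteration; a terminating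
-- Python run increases i by at least 1 per iteration, so fuel = len(s)+1 is never exhausted on Pre_)
def evalLoopA (d : PySem.Dict String String) (s : String) (n : Int) (fuel : Nat) (i : Int) (ans : List String) : List String :=
  match fuel with
  | 0 => ans
  | fuel + 1 =>
    if i < n then
      match PySem.Str.pyGet? s i with
      | none => ans   -- unreachable: 0 ≤ i < n on every run the claim covers
      | some c =>
        if c = '(' then
          let j := PySem.Str.findFrom s ")" (i + 1)
          evalLoopA d s n fuel (j + 1)
            (ans ++ [PySem.Dict.getD d (PySem.Str.slice s (some (i + 1)) (some j)) "?"])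
        else
          evalLoopA d s n fuel (i + 1) (ans ++ [String.ofList [c]])
    else ans

def evaluate (s : String) (knowledge : List (List String)) : String :=
  let d := evalBuildA knowledge
  let n := PySem.Str.len s
  PySem.Str.join "" (evalLoopA d s n (s.toList.length + 1) 0 [])

-- ===== PORT B =====
-- str.partition ported by hand (PySem has no partition): split at the FIRST occurrence of sep; exact
def pyPartition (s : String) (sep : String) : String × String × String :=
  let i := PySem.Str.find s sep
  if i = -1 then (s, "", "")
  else (PySem.Str.slice s none (some i), sep, PySem.Str.slice s (some (i + PySem.Str.len sep)) none)

-- d = dict(knowledge); same ValueError on a row not of length 2 (excluded by Pre_evaluate)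
def evalBuildB (knowledge : List (List String)) : PySem.Dict String String :=
  knowledge.foldl (fun d kv =>
    match kv with
    | [a, b] => d.insert a b
    | _ => d) PySem.Dict.empty

-- the while-True loop of B; fuel is a totalization guard (rest strictly shrinks each iteration)
def evalLoopB (d : PySem.Dict String String) (fuel : Nat) (rest : String) (parts : List String) : List String :=
  match fuel with
  | 0 => parts
  | fuel + 1 =>
    let p := pyPartition rest "("
    let parts := parts ++ [p.1]
    if p.2.1 = "" then parts
    else
      let q := pyPartition p.2.2 ")"
      evalLoopB d fuel q.2.2 (parts ++ [PySem.Dict.getD d q.1 "?"])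

def evaluate_alt (s : String) (knowledge : List (List String)) : String :=
  let d := evalBuildB knowledge
  PySem.Str.join "" (evalLoopB d (s.toList.length + 1) s [])

-- ===== PRECONDITION & SPEC =====
-- Pre_ excludes exactly the inputs on which the Python A does not return: a knowledge row whose
-- length is not 2 (ValueError when unpacking), and a '(' in s with no ')' after it (s.find
-- returns -1 there and the loop never terminates).
def Pre_evaluate (s : String) (knowledge : List (List String)) : Prop :=
  (knowledge.all fun kv => kv.length == 2) = true ∧
  ∀ i < s.toList.length, s.toList[i]? = some '(' → ')' ∈ s.toList.drop (i + 1)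

instance (s : String) (knowledge : List (List String)) : Decidable (Pre_evaluate s knowledge) := by
  unfold Pre_evaluate; infer_instance

def pvWitness_evaluate : String × List (List String) := ("(name)is(age)yearsold", [["name", "bob"], ["age", "two"]])

def Spec_evaluate (s : String) (knowledge : List (List String)) (out : String) : Prop := out = evaluate_alt s knowledge
instance (s : String) (knowledge : List (List String)) (out : String) : Decidable (Spec_evaluate s knowledge out) := by unfold Spec_evaluate; infer_instance

-- ===== CLAIM (what is proved, stated in full; the proofs are below) =====
def Claim_equal_evaluate : Prop := ∀ (s : String) (knowledge : List (List String)), Dom_evaluate s knowledge → Pre_evaluate s knowledge → Spec_evaluate s knowledge (evaluate s knowledge)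

-- ===== LEMMAS AND PROOFS =====

-- the common meaning of both loops, one character at a time, as flattened output
def evalSpecF (d : PySem.Dict String String) : List Char → List Char
  | [] => []
  | c :: t =>
    if c = '(' then
      (PySem.Dict.getD d (String.ofList (t.takeWhile (· ≠ ')'))) "?").toList
        ++ evalSpecF d ((t.dropWhile (· ≠ ')')).drop 1)
    else c :: evalSpecF d t
termination_by l => l.length
decreasing_by
  · simp only [List.length_cons, List.length_drop]
    have h1 : (t.dropWhile (fun c => decide (c ≠ ')'))).length ≤ t.length := t.length_dropWhile_le _
    omega
  · simp

lemma join_empty_flatten (xss : List (List Char)) : PySem.Chars.join [] xss = xss.flatten := by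
  induction xss with
  | nil => simp [PySem.Chars.join_nil]
  | cons x xs ih => cases xs <;> simp_all [PySem.Chars.join_singleton, PySem.Chars.join_cons_cons]

lemma takeWhile_take (p : Char → Bool) : ∀ (t : List Char) (m : Nat),
    (∀ k < m, ∀ x, t[k]? = some x → p x = true) → (∀ x, t[m]? = some x → p x = false) →
    t.takeWhile p = t.take m ∧ t.dropWhile p = t.drop m := by
  intro t
  induction t with
  | nil => intro m _ _; simp
  | cons a t ih =>
    intro m hlt hm
    cases m with
    | zero =>
        have hpa : p a = false := hm a rfl
        simp [hpa]
    | succ m =>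
        have hpa : p a = true := hlt 0 (Nat.succ_pos m) a rfl
        have := ih m (fun k hk x hx => hlt (k+1) (by omega) x (by simpa using hx))
          (fun x hx => hm x (by simpa using hx))
        simp [hpa, this.1, this.2]

lemma takeWhile_dropWhile_of_find (t : List Char) (c : Char) (h : c ∈ t) :
    0 ≤ PySem.Chars.find t [c] ∧
    t.take (PySem.Chars.find t [c]).toNat = t.takeWhile (· ≠ c) ∧
    t.drop (PySem.Chars.find t [c]).toNat = t.dropWhile (· ≠ c) := by
  have hinf : [c] <:+: t := by
    obtain ⟨l1, l2, rfl⟩ := List.append_of_mem h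
    exact ⟨l1, l2, by simp⟩
  have h0 : 0 ≤ PySem.Chars.find t [c] := (PySem.Chars.find_nonneg_iff t [c]).mpr hinf
  obtain ⟨hpref, hmin⟩ := PySem.Chars.find_spec h0
  set m := (PySem.Chars.find t [c]).toNat with hm
  have hdm : t.drop m = c :: (t.drop m).tail := by
    obtain ⟨u, hu⟩ := hpref
    rw [← hu]; simp
  have htk := takeWhile_take (fun x => decide (x ≠ c)) t m
    (fun k hk x hx => by
      have hkl : k < t.length := (List.getElem?_eq_some_iff.mp hx).1
      have hx' : t[k] = x := by simpa [List.getElem?_eq_getElem hkl] using hx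
      simp only [decide_eq_true_eq]
      intro hxc
      exact hmin k hk ⟨t.drop (k+1), by rw [← hx', ← hxc] at *; exact (List.drop_eq_getElem_cons hkl).symm⟩)
    (fun x hx => by
      have : t[m]? = some c := by
        have hml : m < t.length := by
          by_contra hc
          rw [List.drop_eq_nil_of_le (by omega)] at hdm; exact (List.cons_ne_nil _ _) hdm.symm
        have := List.drop_eq_getElem_cons hml (l := t)
        rw [this] at hdm
        simp [List.getElem?_eq_getElem hml, (List.cons.injEq _ _ _ _ ▸ hdm : _ ∧ _).1]
      rw [this] at hx
      simp_all)
  exact ⟨h0, htk.1.symm, htk.2.symm⟩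

lemma specF_no_paren (d : PySem.Dict String String) (l : List Char) (h : '(' ∉ l) :
    evalSpecF d l = l := by
  induction l with
  | nil => rw [evalSpecF]
  | cons x xs ih =>
      simp only [List.mem_cons, not_or] at h
      rw [evalSpecF, if_neg (fun hx => h.1 hx.symm), ih h.2]

lemma specF_append_no_paren (d : PySem.Dict String String) (pre l : List Char) (h : '(' ∉ pre) :
    evalSpecF d (pre ++ l) = pre ++ evalSpecF d l := by
  induction pre with
  | nil => rfl
  | cons x xs ih =>
      simp only [List.mem_cons, not_or] at h
      rw [List.cons_append, evalSpecF, if_neg (fun hx => h.1 hx.symm), ih h.2]; rfl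

lemma loopA_spec (d : PySem.Dict String String) (s : String)
    (hpre : ∀ i < s.toList.length, s.toList[i]? = some '(' → ')' ∈ s.toList.drop (i + 1)) :
    ∀ (fuel i : Nat) (acc : List String), s.toList.length ≤ i + fuel →
    ((evalLoopA d s (PySem.Str.len s) fuel (i : Int) acc).map String.toList).flatten
      = (acc.map String.toList).flatten ++ evalSpecF d (s.toList.drop i) := by
  intro fuel
  induction fuel with
  | zero =>
      intro i acc hle
      rw [evalLoopA, List.drop_eq_nil_of_le (by omega), evalSpecF]
      simp
  | succ fuel ih =>
      intro i acc hle
      rw [evalLoopA]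
      by_cases hin : i < s.toList.length
      · have hlt : (i : Int) < PySem.Str.len s := by rw [PySem.Str.len_eq]; exact_mod_cast hin
        rw [if_pos hlt, PySem.Str.pyGet?_natCast, List.getElem?_eq_getElem hin]
        simp only []
        have hdropi : s.toList.drop i = s.toList[i] :: s.toList.drop (i + 1) :=
          List.drop_eq_getElem_cons hin
        by_cases hpc : s.toList[i] = '('
        · rw [if_pos hpc]
          -- the '(' branch
          have hmem : ')' ∈ s.toList.drop (i + 1) :=
            hpre i hin (by rw [List.getElem?_eq_getElem hin, hpc])
          obtain ⟨h0, htake, hdrop⟩ := takeWhile_dropWhile_of_find (s.toList.drop (i + 1)) ')' hmem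
          set t := s.toList.drop (i + 1) with ht
          set f := PySem.Chars.find t [')'] with hf
          have hfcast : f = ((f.toNat : Nat) : Int) := (Int.toNat_of_nonneg h0).symm
          have hi1 : i + 1 ≤ s.toList.length := by omega
          have hjval : PySem.Str.findFrom s ")" ((i : Int) + 1) = ((i + 1 + f.toNat : Nat) : Int) := by
            rw [PySem.Str.findFrom_eq]
            have : ((i : Int) + 1) = ((i + 1 : Nat) : Int) := by push_cast; ring
            rw [this, show (")" : String).toList = [')'] from rfl,
              PySem.Chars.findFrom_natCast s.toList [')'] (i + 1) hi1]
            rw [← ht, ← hf, if_neg (by omega)]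
            omega
          rw [hjval]
          have hkey : PySem.Str.slice s (some ((i : Int) + 1)) (some ((i + 1 + f.toNat : Nat) : Int))
              = String.ofList (t.takeWhile (· ≠ ')')) := by
            apply String.toList_inj.mp
            rw [PySem.Str.toList_slice, String.toList_ofList, PySem.Chars.slice_eq_listSlice]
            have : ((i : Int) + 1) = ((i + 1 : Nat) : Int) := by push_cast; ring
            rw [this, show ((i + 1 + f.toNat : Nat) : Int) = ((i + 1 : Nat) : Int) + ((f.toNat : Nat) : Int) by push_cast; ring]
            rw [PySem.List.slice_natCast_add, ← ht, htake]
          rw [hkey]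
          have hcall : ((i + 1 + f.toNat : Nat) : Int) + 1 = ((i + 1 + f.toNat + 1 : Nat) : Int) := by
            push_cast; ring
          rw [hcall, ih (i + 1 + f.toNat + 1) _ (by omega)]
          rw [hdropi, evalSpecF, if_pos hpc]
          have hdroprest : s.toList.drop (i + 1 + f.toNat + 1) = (t.dropWhile (· ≠ ')')).drop 1 := by
            rw [← hdrop, ht, List.drop_drop, List.drop_drop]
            ring_nf
          rw [hdroprest]
          simp
        · rw [if_neg hpc]
          have : ((i : Int) + 1) = ((i + 1 : Nat) : Int) := by push_cast; ring
          rw [this, ih (i + 1) _ (by omega), hdropi, evalSpecF, if_neg hpc]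
          simp
      · rw [if_neg (by rw [PySem.Str.len_eq]; exact_mod_cast hin)]
        rw [List.drop_eq_nil_of_le (by omega), evalSpecF]
        simp

lemma singleton_infix_iff_mem (c : Char) (t : List Char) : [c] <:+: t ↔ c ∈ t := by
  constructor
  · intro h; exact h.subset (by simp)
  · intro h
    obtain ⟨l1, l2, rfl⟩ := List.append_of_mem h
    exact ⟨l1, l2, by simp⟩

set_option maxHeartbeats 2000000 in
lemma loopB_spec (d : PySem.Dict String String) :
    ∀ (fuel : Nat) (rest : String) (parts : List String), rest.toList.length < fuel →
    ((evalLoopB d fuel rest parts).map String.toList).flatten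
      = (parts.map String.toList).flatten ++ evalSpecF d rest.toList := by
  intro fuel
  induction fuel with
  | zero => intro rest parts h; omega
  | succ fuel ih =>
      intro rest parts hfl
      rw [evalLoopB]
      unfold pyPartition
      rw [PySem.Str.find_eq, show ("(" : String).toList = ['('] from rfl]
      by_cases hmem : '(' ∈ rest.toList
      · obtain ⟨h0, htake, hdrop⟩ := takeWhile_dropWhile_of_find rest.toList '(' hmem
        rw [if_neg (show ¬(PySem.Chars.find rest.toList ['('] = -1) by omega)]
        simp only []
        rw [if_neg (by decide)]
        set f1 := PySem.Chars.find rest.toList ['('] with hf1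
        -- the text after the '(' :
        have hlen1 : PySem.Str.len "(" = 1 := by rw [PySem.Str.len_eq]; rfl
        have hafter : (PySem.Str.slice rest (some (f1 + PySem.Str.len "(")) none).toList
            = rest.toList.drop (f1.toNat + 1) := by
          rw [hlen1, PySem.Str.toList_slice, PySem.Chars.slice_eq_listSlice,
            PySem.List.slice_from _ (by omega)]
          congr 1; omega
        have hhead : rest.toList.drop f1.toNat = '(' :: rest.toList.drop (f1.toNat + 1) := by
          obtain ⟨hpref, _⟩ := PySem.Chars.find_spec (s := rest.toList) (sub := ['(']) h0
          obtain ⟨u, hu⟩ := hpref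
          rw [← hf1] at hu
          rw [← hu, ← List.tail_drop, ← hu]
          rfl
        set u := rest.toList.drop (f1.toNat + 1) with hu
        have hsplit : rest.toList = rest.toList.takeWhile (· ≠ '(') ++ '(' :: u := by
          conv_lhs => rw [← List.takeWhile_append_dropWhile (p := fun x => decide (x ≠ '(')) (l := rest.toList)]
          rw [← hdrop, hhead]
        have hbefore : (PySem.Str.slice rest none (some f1)).toList
            = rest.toList.takeWhile (· ≠ '(') := by
          rw [PySem.Str.toList_slice, PySem.Chars.slice_eq_listSlice,
            PySem.List.slice_to _ (by omega), htake]
        have hulen : u.length < rest.toList.length := by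
          rw [hu, List.length_drop]
          have := List.length_pos_of_mem hmem
          omega
        -- the second partition, on the text after '('
        rw [PySem.Str.find_eq, show (")" : String).toList = [')'] from rfl]
        by_cases hmem2 : ')' ∈ (PySem.Str.slice rest (some (f1 + PySem.Str.len "(")) none).toList
        · rw [hafter] at hmem2
          obtain ⟨h02, htake2, hdrop2⟩ := takeWhile_dropWhile_of_find u ')' hmem2
          rw [hafter, if_neg (show ¬(PySem.Chars.find u [')'] = -1) by omega)]
          simp only []
          set f2 := PySem.Chars.find u [')'] with hf2
          clear_value f2
          have hkey : PySem.Str.slice rest (some (f1 + PySem.Str.len "(")) none = String.ofList u := by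
            apply String.toList_inj.mp
            rw [hafter, String.toList_ofList]
          have hkey2 : PySem.Str.slice (PySem.Str.slice rest (some (f1 + PySem.Str.len "(")) none) none (some f2)
              = String.ofList (u.takeWhile (· ≠ ')')) := by
            apply String.toList_inj.mp
            rw [PySem.Str.toList_slice, PySem.Chars.slice_eq_listSlice, hafter,
              PySem.List.slice_to _ (by omega), String.toList_ofList, htake2]
          have hrest' : (PySem.Str.slice (PySem.Str.slice rest (some (f1 + PySem.Str.len "(")) none)
              (some (f2 + PySem.Str.len ")")) none).toList = (u.dropWhile (· ≠ ')')).drop 1 := by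
            have htn : (f2 + 1).toNat = f2.toNat + 1 := by omega
            rw [show PySem.Str.len ")" = 1 from by rw [PySem.Str.len_eq]; rfl,
              PySem.Str.toList_slice, PySem.Chars.slice_eq_listSlice, hafter,
              PySem.List.slice_from _ (show (0:ℤ) ≤ f2 + 1 from by omega), htn, ← hdrop2,
              List.drop_drop]
            rw [List.drop_drop, hu, List.drop_drop]
          have hrlen : (PySem.Str.slice (PySem.Str.slice rest (some (f1 + PySem.Str.len "(")) none)
              (some (f2 + PySem.Str.len ")")) none).toList.length < fuel := by
            rw [hrest']
            have h1 : (u.dropWhile (· ≠ ')')).length ≤ u.length := u.length_dropWhile_le _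
            have h2 : ((u.dropWhile (· ≠ ')')).drop 1).length ≤ (u.dropWhile (· ≠ ')')).length := by
              rw [List.length_drop]; omega
            omega
          rw [hkey2, ih _ _ hrlen, hrest']
          conv_rhs => rw [hsplit]
          rw [specF_append_no_paren _ _ _ (fun hx => by simpa using List.mem_takeWhile_imp hx),
            evalSpecF, if_pos rfl]
          simp [hbefore]
        · rw [hafter] at hmem2
          have hfind2 : PySem.Chars.find (PySem.Str.slice rest (some (f1 + PySem.Str.len "(")) none).toList [')'] = -1 := by
            rw [hafter, PySem.Chars.find_eq_neg_one_iff, singleton_infix_iff_mem]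
            exact hmem2
          rw [hfind2, if_pos rfl]
          simp only []
          have hkey : PySem.Str.slice rest (some (f1 + PySem.Str.len "(")) none = String.ofList (u.takeWhile (· ≠ ')')) := by
            apply String.toList_inj.mp
            rw [hafter, String.toList_ofList, List.takeWhile_eq_self_iff.mpr
              (fun x hx => by simp only [decide_eq_true_eq]; rintro rfl; exact hmem2 hx)]
          have hdw : (u.dropWhile (· ≠ ')')).drop 1 = [] := by
            have : u.dropWhile (· ≠ ')') = [] := List.dropWhile_eq_nil_iff.mpr
              (fun x hx => by simp only [decide_eq_true_eq]; rintro rfl; exact hmem2 hx)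
            rw [this]; rfl
          rw [hkey, ih "" _ (by simp; omega)]
          conv_rhs => rw [hsplit]
          rw [specF_append_no_paren _ _ _ (fun hx => by simpa using List.mem_takeWhile_imp hx),
            evalSpecF, if_pos rfl, hdw]
          simp [hbefore, evalSpecF]
      · have : PySem.Chars.find rest.toList ['('] = -1 := by
          rw [PySem.Chars.find_eq_neg_one_iff, singleton_infix_iff_mem]; exact hmem
        rw [this]
        simp [specF_no_paren d _ hmem]

-- ===== VERDICT (by name: the statement is the Claim_ definition above) =====
theorem evaluate_spec : Claim_equal_evaluate := by
  intro s knowledge _hdom hpre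
  unfold Spec_evaluate evaluate evaluate_alt
  have hbuild : evalBuildA knowledge = evalBuildB knowledge := rfl
  apply String.toList_inj.mp
  rw [PySem.Str.toList_join, PySem.Str.toList_join]
  rw [show ("" : String).toList = [] from rfl, join_empty_flatten, join_empty_flatten]
  have h1 := loopA_spec (evalBuildA knowledge) s hpre.2 (s.toList.length + 1) 0 [] (by omega)
  simp only [Int.natCast_zero, List.drop_zero, List.map_nil, List.flatten_nil, List.nil_append] at h1
  have h2 := loopB_spec (evalBuildB knowledge) (s.toList.length + 1) s [] (by omega)
  simp only [List.map_nil, List.flatten_nil, List.nil_append] at h2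
  rw [h1, hbuild, h2]
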